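-- pv_equiv track=rewrite | github.com/akashdeep3194/Scaler | d53/Cyclic Permutations.py | solve
-- ===== SOURCE A (Python) =====
-- def solve(A, B):
--     s = A+"#"+B+B[:len(B)-1]
--     z = [0 for _ in range(len(s))]
--     z[0] = len(s)
--     L = R = ans = 0
--     for i in range(1, len(s)):
--         ctr = 0
--         if i >= L and i <= R:
--             if s[i] == s[i-L]:
--                 if z[i-L] < R-i+1:
--                     z[i] = z[i-L]
--                 else:
--                     z[i] = R-i+1
--                     k = R+1
--                     while k < len(s) and s[k] == s[k-i]:
--                         ctr += 1
--                         k += 1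
--                     z[i] = ctr + z[i]
--                     L = i
--                     R = k-1
--         else:
--             j = i
--             while j < len(s) and s[j] == s[j-i]:
--                 ctr += 1
--                 j += 1
--             z[i] = ctr
--             R = j-1
--             L = i
--         if z[i] == len(B):
--             ans += 1
--     return ans
-- ===== SOURCE B (Python) =====
-- def solve(A, B):
--     s = A + "#" + B + B[:-1]
--     ans = 0
--     for i in range(1, len(s)):
--         k = 0
--         while i + k < len(s) and s[k] == s[i + k]:
--             k += 1
--         if k == len(B):
--             ans += 1
--     return ans
-- ===== Notes on version B (the rewrite author's own statement) =====
-- stated objective: simpler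
-- what changed: Replaces the Z-algorithm's maintained z-array and [L,R] reuse window with a direct naive longest-common-prefix scan per position, keeping only the running count.
import Mathlib
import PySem

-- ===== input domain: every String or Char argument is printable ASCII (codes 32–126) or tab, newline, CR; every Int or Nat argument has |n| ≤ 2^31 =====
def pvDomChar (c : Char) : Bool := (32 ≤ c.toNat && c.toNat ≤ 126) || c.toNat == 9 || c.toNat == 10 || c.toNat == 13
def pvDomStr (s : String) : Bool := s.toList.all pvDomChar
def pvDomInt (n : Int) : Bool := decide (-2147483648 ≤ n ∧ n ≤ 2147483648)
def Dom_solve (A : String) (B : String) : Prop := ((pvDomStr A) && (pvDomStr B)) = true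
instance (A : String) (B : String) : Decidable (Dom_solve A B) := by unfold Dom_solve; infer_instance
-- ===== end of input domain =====

-- B replaces A's Z-algorithm (z-array + [L,R] window reuse) by a direct naive
-- longest-common-prefix scan per position, keeping only the running count: simpler, same result.


-- ===== PORT A =====
-- while k < len(s) and s[k] == s[k-off]: ctr += 1; k += 1  — returns (ctr, k)
def aExt (s : List Char) (off : Nat) (k : Nat) (ctr : Nat) : Nat × Nat :=
  if h : k < s.length ∧ s[k]? = s[k - off]? then aExt s off (k + 1) (ctr + 1) else (ctr, k)
termination_by s.length - k
decreasing_by omega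

-- one iteration of A's main loop; state = (z, L, R, ans)
def aStep (s : List Char) (lenB : Nat) (st : List Nat × Nat × Nat × Int) (i : Nat) :
    List Nat × Nat × Nat × Int :=
  let z := st.1; let L := st.2.1; let R := st.2.2.1; let ans := st.2.2.2
  let t :=
    if L ≤ i ∧ i ≤ R then
      if s[i]? = s[i - L]? then
        let zv := (z[i - L]?).getD 0
        if zv < R - i + 1 then (z.set i zv, L, R)
        else
          let p := aExt s i (R + 1) 0
          (z.set i (R - i + 1 + p.1), i, p.2 - 1)
      else (z, L, R)
    else
      let p := aExt s i i 0
      (z.set i p.1, i, p.2 - 1)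
  let ans' := if (t.1[i]?).getD 0 = lenB then ans + 1 else ans
  (t.1, t.2.1, t.2.2, ans')

def solve (A : String) (B : String) : Int :=
  let s := A.toList ++ ['#'] ++ B.toList ++
    PySem.List.slice B.toList none (some ((B.toList.length : Int) - 1))
  let n := s.length
  let z := (List.replicate n 0).set 0 n
  ((List.range' 1 (n - 1)).foldl (aStep s B.toList.length) (z, 0, 0, 0)).2.2.2

-- ===== PORT B =====
-- k = 0; while i + k < len(s) and s[k] == s[i+k]: k += 1  — returns k
def bExt (s : List Char) (i : Nat) (k : Nat) : Nat :=
  if h : i + k < s.length ∧ s[k]? = s[i + k]? then bExt s i (k + 1) else k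
termination_by s.length - (i + k)
decreasing_by omega

def solve_alt (A : String) (B : String) : Int :=
  let s := A.toList ++ ['#'] ++ B.toList ++ PySem.List.slice B.toList none (some (-1))
  (List.range' 1 (s.length - 1)).foldl
    (fun ans i => if bExt s i 0 = B.toList.length then ans + 1 else ans) 0

-- ===== PRECONDITION & SPEC =====
def Spec_solve (A : String) (B : String) (out : Int) : Prop := out = solve_alt A B
instance (A : String) (B : String) (out : Int) : Decidable (Spec_solve A B out) := by
  unfold Spec_solve; infer_instance

-- ===== CLAIM (what is proved, stated in full; the proofs are below) =====
def Claim_equal_solve : Prop := ∀ (A : String) (B : String), Dom_solve A B → Spec_solve A B (solve A B)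

-- ===== LEMMAS AND PROOFS =====

-- longest common prefix length
def pvLcp : List Char → List Char → Nat
  | a :: as, b :: bs => if a = b then pvLcp as bs + 1 else 0
  | _, _ => 0

-- the z-value at position t
def zvFun (s : List Char) (t : Nat) : Nat := pvLcp s (s.drop t)

theorem pvLcp_nil_right (xs : List Char) : pvLcp xs [] = 0 := by cases xs <;> rfl

theorem pvLcp_le_right (xs ys : List Char) : pvLcp xs ys ≤ ys.length := by
  induction xs generalizing ys with
  | nil => cases ys <;> simp [pvLcp]
  | cons a as ih =>
    cases ys with
    | nil => simp [pvLcp]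
    | cons b bs =>
      simp only [pvLcp, List.length_cons]
      split
      · have := ih bs; omega
      · omega

theorem pvLcp_self (xs : List Char) : pvLcp xs xs = xs.length := by
  induction xs with
  | nil => rfl
  | cons a as ih => simp [pvLcp, ih]

theorem pvLcp_get {xs ys : List Char} {t : Nat} (h : t < pvLcp xs ys) : xs[t]? = ys[t]? := by
  induction xs generalizing ys t with
  | nil => cases ys <;> simp [pvLcp] at h
  | cons a as ih =>
    cases ys with
    | nil => simp [pvLcp] at h
    | cons b bs =>
      simp only [pvLcp] at h
      split at h
      · cases t with
        | zero => simp_all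
        | succ t => simpa using ih (by omega)
      · omega

theorem pvLcp_drop_step {s : List Char} {a b : Nat} (hab : a ≤ b) (hb : b < s.length) :
    pvLcp (s.drop a) (s.drop b) =
      if s[a]? = s[b]? then pvLcp (s.drop (a + 1)) (s.drop (b + 1)) + 1 else 0 := by
  have ha : a < s.length := lt_of_le_of_lt hab hb
  rw [List.drop_eq_getElem_cons ha, List.drop_eq_getElem_cons hb]
  simp only [pvLcp, List.getElem?_eq_getElem ha, List.getElem?_eq_getElem hb,
    Option.some.injEq]

theorem pvLcp_drop_stop {s : List Char} {a b : Nat} (hb : s.length ≤ b) :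
    pvLcp (s.drop a) (s.drop b) = 0 := by
  rw [List.drop_eq_nil_of_le hb, pvLcp_nil_right]

theorem aExt_eq (s : List Char) (off k ctr : Nat) (hoff : off ≤ k) :
    aExt s off k ctr = (ctr + pvLcp (s.drop (k - off)) (s.drop k),
                        k + pvLcp (s.drop (k - off)) (s.drop k)) := by
  rw [aExt]
  split
  · rename_i h
    rw [aExt_eq s off (k + 1) (ctr + 1) (by omega)]
    rw [pvLcp_drop_step (Nat.sub_le k off) h.1, if_pos h.2.symm]
    have e : k + 1 - off = k - off + 1 := by omega
    rw [e]
    simp only [Prod.mk.injEq]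
    omega
  · rename_i h
    simp only [not_and] at h
    by_cases hk : k < s.length
    · rw [pvLcp_drop_step (Nat.sub_le k off) hk, if_neg (fun he => h hk he.symm)]; simp
    · rw [pvLcp_drop_stop (by omega)]; simp
termination_by s.length - k
decreasing_by omega

theorem bExt_eq (s : List Char) (i k : Nat) :
    bExt s i k = k + pvLcp (s.drop k) (s.drop (i + k)) := by
  rw [bExt]
  split
  · rename_i h
    rw [bExt_eq s i (k + 1)]
    rw [pvLcp_drop_step (by omega) h.1, if_pos h.2]
    have e : i + (k + 1) = i + k + 1 := by omega
    rw [e]; omega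
  · rename_i h
    simp only [not_and] at h
    by_cases hk : i + k < s.length
    · rw [pvLcp_drop_step (by omega) hk, if_neg (h hk)]; simp
    · rw [pvLcp_drop_stop (by omega)]; simp
termination_by s.length - (i + k)
decreasing_by omega

theorem pvLcp_split (s : List Char) (a b m : Nat) (hab : a ≤ b) (hlen : b + m ≤ s.length)
    (h : ∀ t, t < m → s[a + t]? = s[b + t]?) :
    pvLcp (s.drop a) (s.drop b) = m + pvLcp (s.drop (a + m)) (s.drop (b + m)) := by
  induction m generalizing a b with
  | zero => simp
  | succ m ih =>
    have hb : b < s.length := by omega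
    rw [pvLcp_drop_step hab hb, if_pos (by simpa using h 0 (by omega))]
    rw [ih (a + 1) (b + 1) (by omega) (by omega)
      (fun t ht => by
        have := h (t + 1) (by omega)
        have e1 : a + (t + 1) = a + 1 + t := by omega
        have e2 : b + (t + 1) = b + 1 + t := by omega
        rwa [e1, e2] at this)]
    have e1 : a + 1 + m = a + (m + 1) := by omega
    have e2 : b + 1 + m = b + (m + 1) := by omega
    rw [e1, e2]
    omega

theorem pvLcp_eq_of (s : List Char) (a b q : Nat) (hab : a ≤ b) (hq : b + q < s.length)
    (h : ∀ t, t < q → s[a + t]? = s[b + t]?) (hmis : s[a + q]? ≠ s[b + q]?) :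
    pvLcp (s.drop a) (s.drop b) = q := by
  rw [pvLcp_split s a b q hab (by omega) h, pvLcp_drop_step (by omega) hq, if_neg hmis]
  omega

-- mismatch just after a z-value (when it stops before the end of s)
theorem zv_mismatch (s : List Char) (t : Nat) (hlt : t + zvFun s t < s.length) :
    s[zvFun s t]? ≠ s[t + zvFun s t]? := by
  intro he
  set q := zvFun s t with hq
  have hsplit : pvLcp (s.drop 0) (s.drop t) = q + pvLcp (s.drop (0 + q)) (s.drop (t + q)) := by
    apply pvLcp_split s 0 t q (by omega) (by omega)
    intro u hu
    have h1 : s[u]? = (s.drop t)[u]? := pvLcp_get (by simpa [zvFun] using hu)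
    rw [List.getElem?_drop] at h1
    simpa using h1
  have hz : pvLcp (s.drop 0) (s.drop t) = q := by simp [hq, zvFun]
  have h0 : pvLcp (s.drop (0 + q)) (s.drop (t + q)) = 0 := by omega
  rw [pvLcp_drop_step (by omega) hlt] at h0
  rw [if_pos (by simpa using he)] at h0
  omega

-- the Z-box gives s[u] = s[u-L] for L ≤ u ≤ R
theorem box_get (s : List Char) (L R u : Nat)
    (hbox : L ≤ R → R - L + 1 ≤ zvFun s L) (hLu : L ≤ u) (huR : u ≤ R) :
    s[u - L]? = s[u]? := by
  have h1 : u - L < pvLcp s (s.drop L) := by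
    have := hbox (le_trans hLu huR); simp only [zvFun] at this; omega
  have h2 := pvLcp_get h1
  rw [List.getElem?_drop] at h2
  have e : L + (u - L) = u := by omega
  rwa [e] at h2

-- invariant carried around A's loop, before iteration i; state = (z, L, R, ans)
def InvA (s : List Char) (i : Nat) (st : List Nat × Nat × Nat × Int) : Prop :=
  st.1.length = s.length ∧
  (∀ t, 1 ≤ t → t < i → st.1[t]? = some (zvFun s t)) ∧
  st.2.2.1 < s.length ∧
  ((st.2.1 = 0 ∧ st.2.2.1 = 0) ∨ (1 ≤ st.2.1 ∧ st.2.1 < i)) ∧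
  (st.2.1 ≤ st.2.2.1 → st.2.2.1 - st.2.1 + 1 ≤ zvFun s st.2.1)

theorem invA_mk (s : List Char) (i : Nat) (z : List Nat) (L R : Nat) (ans : Int)
    (h1 : z.length = s.length)
    (h2 : ∀ t, 1 ≤ t → t < i → z[t]? = some (zvFun s t))
    (h3 : R < s.length)
    (h4 : (L = 0 ∧ R = 0) ∨ (1 ≤ L ∧ L < i))
    (h5 : L ≤ R → R - L + 1 ≤ zvFun s L) :
    InvA s i (z, L, R, ans) := ⟨h1, h2, h3, h4, h5⟩

theorem aStep_inv (s : List Char) (lenB : Nat) (i : Nat) (z : List Nat) (L R : Nat) (ans : Int)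
    (hi1 : 1 ≤ i) (hin : i < s.length) (hInv : InvA s i (z, L, R, ans)) :
    InvA s (i + 1) (aStep s lenB (z, L, R, ans) i) ∧
    (aStep s lenB (z, L, R, ans) i).2.2.2 = (if zvFun s i = lenB then ans + 1 else ans) := by
  obtain ⟨hlen, hz, hR, hLR, hbox⟩ := hInv
  simp only at hlen hz hR hLR hbox
  have hzlen : i < z.length := by omega
  have hLi : L ≤ i := by rcases hLR with ⟨h0, _⟩ | ⟨_, h⟩ <;> omega
  by_cases hiR : i ≤ R
  · -- i inside the Z-box
    have hL1 : 1 ≤ L ∧ L < i := by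
      rcases hLR with ⟨h0, hr0⟩ | h
      · omega
      · exact h
    have hchar : s[i]? = s[i - L]? := (box_get s L R i hbox hLi hiR).symm
    have hziL : z[i - L]? = some (zvFun s (i - L)) := hz (i - L) (by omega) (by omega)
    have hmatch : ∀ t, t < zvFun s (i - L) → i + t ≤ R → s[t]? = s[i + t]? := by
      intro t ht hR'
      have h1 : s[t]? = s[(i - L) + t]? := by
        have h1' := pvLcp_get (show t < pvLcp s (s.drop (i - L)) from ht)
        rwa [List.getElem?_drop] at h1'
      have h2 : s[(i + t) - L]? = s[i + t]? := box_get s L R (i + t) hbox (by omega) hR'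
      have e : (i + t) - L = (i - L) + t := by omega
      rw [e] at h2
      rw [h1, h2]
    by_cases hcase : zvFun s (i - L) < R - i + 1
    · -- copy case: z[i] := z[i-L]
      have hiqR : i + zvFun s (i - L) ≤ R := by omega
      have hcopy : zvFun s i = zvFun s (i - L) := by
        have hmis : ¬ s[0 + zvFun s (i - L)]? = s[i + zvFun s (i - L)]? := by
          have hb : s[(i + zvFun s (i - L)) - L]? = s[i + zvFun s (i - L)]? :=
            box_get s L R (i + zvFun s (i - L)) hbox (by omega) hiqR
          have e : (i + zvFun s (i - L)) - L = (i - L) + zvFun s (i - L) := by omega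
          rw [e] at hb
          have hmm := zv_mismatch s (i - L) (by omega)
          simp only [Nat.zero_add]
          intro he
          exact hmm (he.trans hb.symm)
        have h' := pvLcp_eq_of s 0 i (zvFun s (i - L)) (by omega) (by omega)
          (fun t ht => by simpa using hmatch t ht (by omega)) hmis
        simpa [zvFun] using h'
      have hstep : aStep s lenB (z, L, R, ans) i =
          (z.set i (zvFun s (i - L)), L, R,
            if zvFun s (i - L) = lenB then ans + 1 else ans) := by
        simp only [aStep, if_pos (And.intro hLi hiR), if_pos hchar, hziL, Option.getD_some,
          if_pos hcase, List.getElem?_set_self hzlen]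
      rw [hstep]
      refine ⟨invA_mk s (i + 1) _ _ _ _ (by simp [hlen]) ?_ hR (Or.inr ⟨hL1.1, by omega⟩) hbox,
        by rw [hcopy]⟩
      intro t ht1 ht2
      by_cases hti : t = i
      · subst hti
        rw [List.getElem?_set_self hzlen, hcopy]
      · rw [List.getElem?_set_ne (Ne.symm hti)]
        exact hz t ht1 (by omega)
    · -- extend case: z[i] := R-i+1 then scan from k = R+1
      have hext := aExt_eq s i (R + 1) 0 (by omega)
      set E := pvLcp (s.drop (R + 1 - i)) (s.drop (R + 1)) with hE
      have hEle : E ≤ s.length - (R + 1) := by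
        have := pvLcp_le_right (s.drop (R + 1 - i)) (s.drop (R + 1))
        simpa [hE] using this
      have hsplit : zvFun s i = R - i + 1 + E := by
        have h' := pvLcp_split s 0 i (R - i + 1) (by omega) (by omega)
          (fun t ht => by simpa using hmatch t (by omega) (by omega))
        have e1 : 0 + (R - i + 1) = R + 1 - i := by omega
        have e2 : i + (R - i + 1) = R + 1 := by omega
        rw [e1, e2] at h'
        simpa [zvFun, hE] using h'
      have hstep : aStep s lenB (z, L, R, ans) i =
          (z.set i (R - i + 1 + E), i, R + E,
            if R - i + 1 + E = lenB then ans + 1 else ans) := by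
        simp only [aStep, if_pos (And.intro hLi hiR), if_pos hchar, hziL, Option.getD_some,
          if_neg hcase, hext, List.getElem?_set_self hzlen]
        have e : R + 1 + E - 1 = R + E := by omega
        rw [e]
        simp
      rw [hstep]
      refine ⟨invA_mk s (i + 1) _ _ _ _ (by simp [hlen]) ?_ (by omega)
        (Or.inr ⟨by omega, by omega⟩) ?_, by rw [hsplit]⟩
      · intro t ht1 ht2
        by_cases hti : t = i
        · subst hti
          rw [List.getElem?_set_self hzlen, hsplit]
        · rw [List.getElem?_set_ne (Ne.symm hti)]
          exact hz t ht1 (by omega)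
      · intro _
        omega
  · -- i outside the Z-box: naive scan from j = i
    have hcond : ¬ (L ≤ i ∧ i ≤ R) := fun hc => hiR hc.2
    have hext := aExt_eq s i i 0 (le_refl i)
    rw [Nat.sub_self] at hext
    have hEz : pvLcp (s.drop 0) (s.drop i) = zvFun s i := by simp [zvFun]
    rw [hEz] at hext
    have hEle : zvFun s i ≤ s.length - i := by
      have h1 := pvLcp_le_right s (s.drop i)
      have h2 : (s.drop i).length = s.length - i := by simp
      simp only [zvFun] at *
      omega
    have hstep : aStep s lenB (z, L, R, ans) i =
        (z.set i (zvFun s i), i, i + zvFun s i - 1,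
          if zvFun s i = lenB then ans + 1 else ans) := by
      simp only [aStep, if_neg hcond, hext, List.getElem?_set_self hzlen, Option.getD_some]
      have e : 0 + zvFun s i = zvFun s i := by omega
      rw [e]
    rw [hstep]
    refine ⟨invA_mk s (i + 1) _ _ _ _ (by simp [hlen]) ?_ (by omega)
      (Or.inr ⟨hi1, by omega⟩) ?_, rfl⟩
    · intro t ht1 ht2
      by_cases hti : t = i
      · subst hti
        rw [List.getElem?_set_self hzlen]
      · rw [List.getElem?_set_ne (Ne.symm hti)]
        exact hz t ht1 (by omega)
    · intro hle
      omega

-- fold the invariant along the rest of the range, matching B's fold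
theorem foldAB (s : List Char) (lenB : Nat) :
    ∀ (c i : Nat) (st : List Nat × Nat × Nat × Int) (ans0 : Int),
      1 ≤ i → i + c ≤ s.length → InvA s i st → st.2.2.2 = ans0 →
      ((List.range' i c).foldl (aStep s lenB) st).2.2.2 =
      (List.range' i c).foldl (fun ans j => if bExt s j 0 = lenB then ans + 1 else ans) ans0 := by
  intro c
  induction c with
  | zero => intro i st ans0 _ _ _ h; simpa using h
  | succ c ih =>
    intro i st ans0 hi1 hic hInv hans
    obtain ⟨z, L, R, ans⟩ := st
    have hstep := aStep_inv s lenB i z L R ans hi1 (by omega) hInv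
    rw [List.range'_succ]
    simp only [List.foldl_cons]
    apply ih (i + 1) _ _ (by omega) (by omega) hstep.1
    rw [hstep.2, bExt_eq]
    simp only [zvFun, List.drop_zero, Nat.add_zero, Nat.zero_add]
    subst hans; rfl

-- the two slice spellings build the same string
theorem slice_eq_dropLast (l : List Char) :
    PySem.List.slice l none (some ((l.length : Int) - 1)) =
      PySem.List.slice l none (some (-1)) := by
  cases l with
  | nil => rfl
  | cons a as =>
    rw [PySem.List.slice_to_neg_one]
    have e : ((a :: as).length : Int) - 1 = ((as.length : Nat) : Int) := by
      simp only [List.length_cons]; omega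
    rw [e, PySem.List.slice_to_natCast]
    rw [List.dropLast_eq_take]
    simp

-- ===== VERDICT (by name: the statement is the Claim_ definition above) =====
theorem solve_spec : Claim_equal_solve := by
  intro A B _
  unfold Spec_solve solve solve_alt
  rw [slice_eq_dropLast]
  set s := A.toList ++ ['#'] ++ B.toList ++ PySem.List.slice B.toList none (some (-1)) with hs
  have hn : 1 ≤ s.length := by
    rw [hs]; simp only [List.length_append, List.length_cons]; omega
  have hInv0 : InvA s 1 ((List.replicate s.length 0).set 0 s.length, 0, 0, 0) := by
    refine ⟨by simp, fun t ht1 ht2 => by omega, hn, Or.inl ⟨rfl, rfl⟩, ?_⟩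
    intro _
    show 0 - 0 + 1 ≤ zvFun s 0
    simp only [zvFun, List.drop_zero, pvLcp_self]
    omega
  have := foldAB s B.toList.length (s.length - 1) 1 _ 0 (by omega) (by omega) hInv0 rfl
  simpa using this
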